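-- pv_equiv track=rewrite | github.com/tycyd/codeforces | dfs/1391E Pairs of Pairs.py | dfs
-- ===== SOURCE A (Python) =====
-- def dfs(node, depth, n, visited, dic, plist, dep_a):
--
--     if node in visited:
--         return
--
--     visited.add(node)
--     plist.append(node)
--
--     if depth > 0:
--         dep_a[depth].append(node)
--
--     if len(plist) > n//2:
--         return plist
--
--     for ch in dic[node]:
--         res = dfs(ch, depth + 1, n, visited, dic, plist, dep_a)
--         if res:
--             return res
--
--     plist.pop()
--
--     return []
-- ===== SOURCE B (Python) =====
-- def dfs(node, depth, n, visited, dic, plist, dep_a):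
--     if node in visited:
--         return
--     half = n // 2
--
--     stack = []
--
--     def enter(v, d):
--         # same bookkeeping A does on first visit of v
--         visited.add(v)
--         plist.append(v)
--         if d > 0:
--             dep_a[d].append(v)
--         if len(plist) > half:
--             return True
--         stack.append((v, iter(dic[v]), d))
--         return False
--
--     if enter(node, depth):
--         return plist
--     while stack:
--         v, it, d = stack[-1]
--         ch = next((c for c in it if c not in visited), None)
--         if ch is None:
--             stack.pop()
--             plist.pop()
--         else:
--             if enter(ch, d + 1):
--                 return plist
--     return []
-- ===== Notes on version B (the rewrite author's own statement) =====
-- stated objective: alternative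
-- what changed: The recursive DFS is replaced by an iterative DFS that drives an explicit stack of (node, remaining-children iterator, depth) frames in a single while-loop, sharing one enter() helper for the visit bookkeeping and the early path-length check.
-- outside the precondition, e.g. on dfs(0, 0, 2, {0}, {0: []}, [], {}): A returns None, B returns None; on dfs(0, 0, 9, {1}, {0: [1]}, [], {}): A returns [], B returns []; on dfs(0, 0, 9, set(), {0: []}, [], {}): A returns [], B returns []
import Mathlib
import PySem

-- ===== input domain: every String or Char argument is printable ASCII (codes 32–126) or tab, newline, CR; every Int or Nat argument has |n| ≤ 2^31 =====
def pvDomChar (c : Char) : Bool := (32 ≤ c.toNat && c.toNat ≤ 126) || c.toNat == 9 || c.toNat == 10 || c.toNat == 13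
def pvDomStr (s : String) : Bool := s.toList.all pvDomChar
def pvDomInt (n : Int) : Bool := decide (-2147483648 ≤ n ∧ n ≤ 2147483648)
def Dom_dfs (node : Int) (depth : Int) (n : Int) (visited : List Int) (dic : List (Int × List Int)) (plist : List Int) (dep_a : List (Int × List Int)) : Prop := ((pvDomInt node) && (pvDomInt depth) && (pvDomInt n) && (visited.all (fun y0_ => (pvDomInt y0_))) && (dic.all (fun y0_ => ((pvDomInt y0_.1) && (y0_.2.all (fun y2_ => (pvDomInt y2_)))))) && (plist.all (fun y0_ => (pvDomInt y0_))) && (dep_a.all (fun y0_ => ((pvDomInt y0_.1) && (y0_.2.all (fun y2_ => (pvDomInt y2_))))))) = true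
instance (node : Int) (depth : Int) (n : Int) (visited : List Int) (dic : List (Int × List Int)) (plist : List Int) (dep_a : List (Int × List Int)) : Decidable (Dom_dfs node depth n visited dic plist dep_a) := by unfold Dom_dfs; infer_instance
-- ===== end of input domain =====

-- B replaces A's recursive DFS by an iterative DFS over an explicit stack of (node, remaining-children, depth)
-- frames (objective: alternative decomposition, same cost). Equivalence is about the RETURN value; the two
-- Pythons in fact perform the identical mutations of visited/plist/dep_a, but only the return value is proved here.

-- ===== PORT A =====
-- Python truthiness of 'res' (None or a list): true iff a non-empty list
def pyTruthy (res : Option (List Int)) : Bool :=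
  match res with
  | some r => !r.isEmpty
  | none => false

-- A is recursive; the port threads the mutated state (visited, plist, dep_a) and uses a fuel argument
-- (dic.length + 2 in the wrapper) that merely makes the same recursion total: each nesting level below the
-- first adds one dic key to visited, so the recursion depth never exceeds dic.length + 1.
mutual
-- one call of Python's dfs: returns (result, visited, plist, dep_a); result none = Python's 'return' (None)
def dfsGoA (fuel : Nat) (node depth n : Int) (dic : PySem.Dict Int (List Int))
    (visited plist : List Int) (dep_a : PySem.Dict Int (List Int)) :
    Option (List Int) × List Int × List Int × PySem.Dict Int (List Int) :=
  match fuel with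
  | 0 => (some [], visited, plist, dep_a)
  | fuel + 1 =>
    if PySem.Set.contains visited node then (none, visited, plist, dep_a)
    -- visited.add(node); plist.append(node); if depth > 0: dep_a[depth].append(node) — the three mutations
    -- below; Dict.modify is exact when depth is a key (Pre_ guarantees it; Python raises KeyError otherwise)
    else if ((plist ++ [node]).length : Int) > PySem.Int.floordiv n 2 then
      (some (plist ++ [node]), PySem.Set.add visited node, plist ++ [node],
        if depth > 0 then dep_a.modify depth [] (fun l => l ++ [node]) else dep_a)
    else
      dfsChA fuel (dic.getD node []) depth n dic (PySem.Set.add visited node) (plist ++ [node])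
        (if depth > 0 then dep_a.modify depth [] (fun l => l ++ [node]) else dep_a)
termination_by (fuel, 0)

-- Python's 'for ch in dic[node]: …' loop with its early return, then 'plist.pop(); return []'
def dfsChA (fuel : Nat) (chs : List Int) (depth n : Int) (dic : PySem.Dict Int (List Int))
    (visited plist : List Int) (dep_a : PySem.Dict Int (List Int)) :
    Option (List Int) × List Int × List Int × PySem.Dict Int (List Int) :=
  match chs with
  | [] => (some [], visited, plist.dropLast, dep_a)   -- plist.pop(): plist is never empty here
  | ch :: rest =>
    match dfsGoA fuel ch (depth + 1) n dic visited plist dep_a with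
    | (res, v1, p1, a1) =>
      if pyTruthy res then (res, v1, p1, a1)
      else dfsChA fuel rest depth n dic v1 p1 a1
termination_by (fuel, chs.length + 1)
end

def dfs (node : Int) (depth : Int) (n : Int) (visited : List Int) (dic : List (Int × List Int)) (plist : List Int) (dep_a : List (Int × List Int)) : List Int :=
  -- Python returns None when node ∈ visited at top level (no list value): that input is outside Pre_; the port gives []
  match dfsGoA (dic.length + 2) node depth n (PySem.Dict.mk dic) visited plist (PySem.Dict.mk dep_a) with
  | (some r, _, _, _) => r
  | (none, _, _, _) => []

-- ===== PORT B =====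
-- number of dic keys not yet visited: the machine's termination measure
def dfsUncov (dic : PySem.Dict Int (List Int)) (visited : List Int) : Nat :=
  ((PySem.Set.ofList dic.keys).filter (fun k => !(PySem.Set.contains visited k))).length

lemma pv_contains_false (s : List Int) (x : Int) :
    PySem.Set.contains s x = false ↔ x ∉ s := by
  rw [Bool.eq_false_iff, Ne, PySem.Set.contains_iff]

lemma pv_contains_add_ne (visited : List Int) (ch k : Int) (hne : k ≠ ch) :
    PySem.Set.contains (PySem.Set.add visited ch) k = PySem.Set.contains visited k := by
  cases h : PySem.Set.contains visited k
  · rw [pv_contains_false] at h ⊢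
    intro hm
    rcases (PySem.Set.mem_add _ _ _).mp hm with hm' | rfl
    · exact h hm'
    · exact hne rfl
  · exact (PySem.Set.contains_iff _ _).mpr
      ((PySem.Set.mem_add _ _ _).mpr (Or.inl ((PySem.Set.contains_iff _ _).mp h)))

lemma pv_length_filter_lt {l : List Int} {p q : Int → Bool} (hpq : ∀ a, p a = true → q a = true)
    (ch : Int) (hch : ch ∈ l) (hp : p ch = false) (hq : q ch = true) :
    (l.filter p).length < (l.filter q).length := by
  induction l with
  | nil => simp at hch
  | cons x xs ih =>
    rcases List.mem_cons.mp hch with rfl | hm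
    · rw [List.filter_cons_of_neg (by simp [hp]), List.filter_cons_of_pos (by simp [hq])]
      exact Nat.lt_succ_of_le (List.Sublist.length_le (List.monotone_filter_right xs hpq))
    · by_cases hx : p x = true
      · rw [List.filter_cons_of_pos (by simp [hx]), List.filter_cons_of_pos (by simp [hpq x hx])]
        simpa using ih hm
      · rw [List.filter_cons_of_neg hx]
        cases hqx : q x
        · rw [List.filter_cons_of_neg (by simp [hqx])]
          exact ih hm
        · rw [List.filter_cons_of_pos (by simp [hqx])]
          exact Nat.lt_succ_of_lt (ih hm)

lemma dfsUncov_add_lt (dic : PySem.Dict Int (List Int)) (visited : List Int) (ch : Int)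
    (hk : ch ∈ PySem.Set.ofList dic.keys) (hv : PySem.Set.contains visited ch = false) :
    dfsUncov dic (PySem.Set.add visited ch) < dfsUncov dic visited := by
  unfold dfsUncov
  refine pv_length_filter_lt ?_ ch hk ?_ ?_
  · intro a ha
    simp only [Bool.not_eq_true'] at ha ⊢
    rw [pv_contains_false] at ha ⊢
    exact fun hs => ha ((PySem.Set.mem_add _ _ _).mpr (Or.inl hs))
  · have h1 : PySem.Set.contains (PySem.Set.add visited ch) ch = true :=
      (PySem.Set.contains_iff _ _).mpr ((PySem.Set.mem_add _ _ _).mpr (Or.inr rfl))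
    show (!PySem.Set.contains (PySem.Set.add visited ch) ch) = false
    rw [h1]
    rfl
  · show (!PySem.Set.contains visited ch) = true
    rw [hv]
    rfl

lemma dfsUncov_add_eq (dic : PySem.Dict Int (List Int)) (visited : List Int) (ch : Int)
    (hk : ch ∉ PySem.Set.ofList dic.keys) :
    dfsUncov dic (PySem.Set.add visited ch) = dfsUncov dic visited := by
  unfold dfsUncov
  congr 1
  refine List.filter_congr ?_
  intro k hkmem
  have hne : k ≠ ch := fun h => hk (h ▸ hkmem)
  rw [pv_contains_add_ne visited ch k hne]

lemma dfs_getD_nil_of_not_key (dic : PySem.Dict Int (List Int)) (ch : Int)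
    (hk : ch ∉ PySem.Set.ofList dic.keys) : dic.getD ch [] = [] := by
  apply PySem.Dict.getD_of_not_contains
  rw [Bool.eq_false_iff, Ne, PySem.Dict.contains_iff_mem_keys]
  exact fun hm => hk ((PySem.Set.mem_ofList _ _).mpr hm)

-- the while-loop over the explicit stack of (node, remaining children, its depth) frames
def dfsMach (dic : PySem.Dict Int (List Int)) (half : Int) (stack : List (Int × List Int × Int))
    (visited plist : List Int) (dep_a : PySem.Dict Int (List Int)) : List Int :=
  match stack with
  | [] => []
  | (v, chs, d) :: rest =>
    match chs with
    | [] =>   -- children exhausted: backtrack (pop frame and plist)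
      dfsMach dic half rest visited plist.dropLast dep_a
    | ch :: cs =>
      if PySem.Set.contains visited ch then
        dfsMach dic half ((v, cs, d) :: rest) visited plist dep_a
      -- enter(ch, d+1): the same three mutations A performs, then either the early return or a new frame
      else if ((plist ++ [ch]).length : Int) > half then plist ++ [ch]
      else
        dfsMach dic half ((ch, dic.getD ch [], d + 1) :: (v, cs, d) :: rest)
          (PySem.Set.add visited ch) (plist ++ [ch])
          (if d + 1 > 0 then dep_a.modify (d + 1) [] (fun l => l ++ [ch]) else dep_a)
termination_by (dfsUncov dic visited, (stack.map (fun f => f.2.1.length)).sum, stack.length)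
decreasing_by
  · apply Prod.Lex.right'
    · simp
    · apply Prod.Lex.right'
      · simp
      · simp
  · apply Prod.Lex.right'
    · simp
    · apply Prod.Lex.left
      simp only [List.map_cons, List.sum_cons, List.length_cons]
      omega
  · rename_i hnv hlen
    rw [Bool.not_eq_true] at hnv
    by_cases hk : ch ∈ PySem.Set.ofList dic.keys
    · exact Prod.Lex.left _ _ (dfsUncov_add_lt dic visited ch hk hnv)
    · apply Prod.Lex.right'
      · exact le_of_eq (dfsUncov_add_eq dic visited ch hk)
      · apply Prod.Lex.left
        rw [dfs_getD_nil_of_not_key dic ch hk]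
        simp only [List.map_cons, List.sum_cons, List.length_cons, List.length_nil]
        omega

def dfs_alt (node : Int) (depth : Int) (n : Int) (visited : List Int) (dic : List (Int × List Int)) (plist : List Int) (dep_a : List (Int × List Int)) : List Int :=
  if PySem.Set.contains visited node then []   -- Python B returns None here, like A; outside Pre_
  -- enter(node, depth), then run the machine on the single initial frame
  else if ((plist ++ [node]).length : Int) > PySem.Int.floordiv n 2 then plist ++ [node]
  else
    dfsMach (PySem.Dict.mk dic) (PySem.Int.floordiv n 2)
      [(node, (PySem.Dict.mk dic).getD node [], depth)]
      (PySem.Set.add visited node) (plist ++ [node])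
      (if depth > 0 then (PySem.Dict.mk dep_a).modify depth [] (fun l => l ++ [node]) else PySem.Dict.mk dep_a)

-- ===== PRECONDITION & SPEC =====
-- Pre_ excludes the inputs where Python A returns no list value or raises: node already visited (A
-- returns None), entering node with a positive depth missing from dep_a (KeyError), and — unless the
-- very first visit already triggers the 'len(plist) > n//2' return, which touches no dict — any input
-- where a KeyError is reachable: conservatively, node must be a dic key, every child mentioned in dic a
-- dic key, and dep_a keyed for every positive reachable depth (depth .. depth+len(dic)).  The
-- conservative closure also excludes some inputs on which A happens to return before touching the
-- missing key; A and B agree there as well (see cites).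
def Pre_dfs (node : Int) (depth : Int) (n : Int) (visited : List Int) (dic : List (Int × List Int)) (plist : List Int) (dep_a : List (Int × List Int)) : Prop :=
  node ∉ visited ∧ (0 < depth → depth ∈ dep_a.map Prod.fst) ∧
  (((plist.length : Int) + 1 > PySem.Int.floordiv n 2) ∨
    (node ∈ dic.map Prod.fst ∧
     (∀ p ∈ dic, ∀ c ∈ p.2, c ∈ dic.map Prod.fst) ∧
     (∀ i ∈ List.range (dic.length + 1), 0 < depth + (i : Int) → (depth + (i : Int)) ∈ dep_a.map Prod.fst)))
instance (node : Int) (depth : Int) (n : Int) (visited : List Int) (dic : List (Int × List Int)) (plist : List Int) (dep_a : List (Int × List Int)) : Decidable (Pre_dfs node depth n visited dic plist dep_a) := by unfold Pre_dfs; infer_instance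

def pvWitness_dfs : Int × Int × Int × List Int × (List (Int × List Int)) × List Int × (List (Int × List Int)) :=
  (0, 0, 4, [], [(0, [1]), (1, [])], [], [(1, []), (2, [])])

def Spec_dfs (node : Int) (depth : Int) (n : Int) (visited : List Int) (dic : List (Int × List Int)) (plist : List Int) (dep_a : List (Int × List Int)) (out : List Int) : Prop := out = dfs_alt node depth n visited dic plist dep_a
instance (node : Int) (depth : Int) (n : Int) (visited : List Int) (dic : List (Int × List Int)) (plist : List Int) (dep_a : List (Int × List Int)) (out : List Int) : Decidable (Spec_dfs node depth n visited dic plist dep_a out) := by unfold Spec_dfs; infer_instance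

-- ===== CLAIM (what is proved, stated in full; the proofs are below) =====
def Claim_equal_dfs : Prop := ∀ (node : Int) (depth : Int) (n : Int) (visited : List Int) (dic : List (Int × List Int)) (plist : List Int) (dep_a : List (Int × List Int)), Dom_dfs node depth n visited dic plist dep_a → Pre_dfs node depth n visited dic plist dep_a → Spec_dfs node depth n visited dic plist dep_a (dfs node depth n visited dic plist dep_a)

-- ===== LEMMAS AND PROOFS =====

lemma dfsUncov_le_of_subset (dic : PySem.Dict Int (List Int)) (s t : List Int)
    (h : ∀ x ∈ s, x ∈ t) : dfsUncov dic t ≤ dfsUncov dic s := by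
  unfold dfsUncov
  refine List.Sublist.length_le (List.monotone_filter_right _ ?_)
  intro k hk
  simp only [Bool.not_eq_true'] at hk ⊢
  rw [pv_contains_false] at hk ⊢
  exact fun hs => hk (h k hs)


lemma dfsUncov_add_le (dic : PySem.Dict Int (List Int)) (visited : List Int) (ch : Int) :
    dfsUncov dic (PySem.Set.add visited ch) ≤ dfsUncov dic visited :=
  dfsUncov_le_of_subset dic visited _ (fun x hx => (PySem.Set.mem_add _ _ _).mpr (Or.inl hx))


-- master simulation lemma: running the machine with a frame (v, chs, d) on top is Python A's children loop
lemma dfsMach_eq_dfsChA (dicD : PySem.Dict Int (List Int))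
    (hdic : ∀ k c, c ∈ dicD.getD k [] → c ∈ dicD.keys) :
    ∀ (fuel : Nat) (chs : List Int) (v d n : Int) (rest : List (Int × List Int × Int))
      (visited plist : List Int) (dep : PySem.Dict Int (List Int)),
      (∀ c ∈ chs, c ∈ dicD.keys) →
      dfsUncov dicD visited + 1 ≤ fuel →
      ∃ r v' p' a',
        dfsChA fuel chs d n dicD visited plist dep = (some r, v', p', a') ∧
        (∀ x ∈ visited, x ∈ v') ∧
        dfsMach dicD (PySem.Int.floordiv n 2) ((v, chs, d) :: rest) visited plist dep =
          (if r = [] then dfsMach dicD (PySem.Int.floordiv n 2) rest v' p' a' else r) := by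
  intro fuel
  induction fuel with
  | zero =>
    intro chs v d n rest visited plist dep hchs hfuel
    omega
  | succ f ihf =>
    intro chs
    induction chs with
    | nil =>
      intro v d n rest visited plist dep hchs hfuel
      refine ⟨[], visited, plist.dropLast, dep, by rw [dfsChA.eq_1], fun x hx => hx, ?_⟩
      rw [dfsMach.eq_2, if_pos rfl]
    | cons ch cs ihc =>
      intro v d n rest visited plist dep hchs hfuel
      by_cases hv : PySem.Set.contains visited ch = true
      · -- child already visited: A's recursive call returns None, the machine skips it
        have hgo : dfsGoA (f + 1) ch (d + 1) n dicD visited plist dep = (none, visited, plist, dep) := by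
          rw [dfsGoA.eq_2, if_pos hv]
        obtain ⟨r, v', p', a', hch', hgrow, hm⟩ :=
          ihc v d n rest visited plist dep (fun c hc => hchs c (List.mem_cons_of_mem _ hc)) hfuel
        refine ⟨r, v', p', a', ?_, hgrow, ?_⟩
        · rw [dfsChA.eq_2, hgo]
          exact hch'
        · rw [dfsMach.eq_3, if_pos hv]
          exact hm
      · have hv' : ¬ PySem.Set.contains visited ch = true := hv
        have hkey : ch ∈ dicD.keys := hchs ch List.mem_cons_self
        by_cases hlong : ((plist ++ [ch]).length : Int) > PySem.Int.floordiv n 2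
        · -- enter(ch) triggers the early 'len(plist) > n//2' return on both sides
          have hgo : dfsGoA (f + 1) ch (d + 1) n dicD visited plist dep =
              (some (plist ++ [ch]), PySem.Set.add visited ch, plist ++ [ch],
                if d + 1 > 0 then dep.modify (d + 1) [] (fun l => l ++ [ch]) else dep) := by
            rw [dfsGoA.eq_2, if_neg hv', if_pos hlong]
          refine ⟨plist ++ [ch], PySem.Set.add visited ch, plist ++ [ch],
            (if d + 1 > 0 then dep.modify (d + 1) [] (fun l => l ++ [ch]) else dep), ?_,
            fun x hx => (PySem.Set.mem_add _ _ _).mpr (Or.inl hx), ?_⟩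
          · rw [dfsChA.eq_2, hgo]
            simp [pyTruthy]
          · rw [dfsMach.eq_3, if_neg hv', if_pos hlong]
            simp
        · -- recurse into ch's subtree
          have hgo : dfsGoA (f + 1) ch (d + 1) n dicD visited plist dep =
              dfsChA f (dicD.getD ch []) (d + 1) n dicD (PySem.Set.add visited ch) (plist ++ [ch])
                (if d + 1 > 0 then dep.modify (d + 1) [] (fun l => l ++ [ch]) else dep) := by
            rw [dfsGoA.eq_2, if_neg hv', if_neg hlong]
          have hvf : PySem.Set.contains visited ch = false := by rwa [Bool.not_eq_true] at hv
          have hfuel1 : dfsUncov dicD (PySem.Set.add visited ch) + 1 ≤ f := by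
            have := dfsUncov_add_lt dicD visited ch ((PySem.Set.mem_ofList _ _).mpr hkey) hvf
            omega
          obtain ⟨r1, v1, p1, a1, hch1, hgrow1, hm1⟩ :=
            ihf (dicD.getD ch []) ch (d + 1) n ((v, cs, d) :: rest) (PySem.Set.add visited ch)
              (plist ++ [ch]) (if d + 1 > 0 then dep.modify (d + 1) [] (fun l => l ++ [ch]) else dep)
              (fun c hc => hdic ch c hc) hfuel1
          have hgrow01 : ∀ x ∈ visited, x ∈ v1 :=
            fun x hx => hgrow1 x ((PySem.Set.mem_add _ _ _).mpr (Or.inl hx))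
          by_cases hr1 : r1 = []
          · -- ch's subtree found nothing: both sides go on with the remaining children cs
            have hfuel2 : dfsUncov dicD v1 + 1 ≤ f + 1 := by
              have h1 := dfsUncov_le_of_subset dicD (PySem.Set.add visited ch) v1 hgrow1
              have h2 := dfsUncov_add_le dicD visited ch
              omega
            obtain ⟨r2, v2, p2, a2, hch2, hgrow2, hm2⟩ :=
              ihc v d n rest v1 p1 a1 (fun c hc => hchs c (List.mem_cons_of_mem _ hc)) hfuel2
            refine ⟨r2, v2, p2, a2, ?_, fun x hx => hgrow2 x (hgrow01 x hx), ?_⟩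
            · rw [dfsChA.eq_2, hgo, hch1]
              simp only [pyTruthy, hr1]
              simpa using hch2
            · rw [dfsMach.eq_3, if_neg hv', if_neg hlong, hm1, if_pos hr1]
              exact hm2
          · -- ch's subtree returned a non-empty path: it is propagated on both sides
            refine ⟨r1, v1, p1, a1, ?_, hgrow01, ?_⟩
            · rw [dfsChA.eq_2, hgo, hch1]
              simp [pyTruthy, hr1]
            · rw [dfsMach.eq_3, if_neg hv', if_neg hlong, hm1, if_neg hr1, if_neg hr1]

-- every value stored in dic contains only dic keys, transported to the Dict wrapper
lemma pv_getD_sublist : ∀ (l : List (Int × List Int)) (k c : Int),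
    c ∈ (PySem.Dict.mk l).getD k [] → ∃ p ∈ l, c ∈ p.2 := by
  intro l
  induction l with
  | nil =>
    intro k c hc
    rw [PySem.Dict.getD_of_not_contains _ _ (by simp)] at hc
    simp at hc
  | cons p rest ih =>
    intro k c hc
    obtain ⟨pk, pv⟩ := p
    rw [PySem.Dict.getD_eq_get?_getD, PySem.Dict.get?_mk_cons] at hc
    by_cases hk : (pk == k) = true
    · rw [if_pos hk] at hc
      exact ⟨(pk, pv), List.mem_cons_self, hc⟩
    · rw [if_neg hk, ← PySem.Dict.getD_eq_get?_getD] at hc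
      obtain ⟨q, hq, hcq⟩ := ih k c hc
      exact ⟨q, List.mem_cons_of_mem _ hq, hcq⟩

lemma dfsUncov_le_len (dic : List (Int × List Int)) (visited : List Int) :
    dfsUncov (PySem.Dict.mk dic) visited ≤ dic.length := by
  unfold dfsUncov
  calc (List.filter _ (PySem.Set.ofList (PySem.Dict.mk dic).keys)).length
      ≤ (PySem.Set.ofList (PySem.Dict.mk dic).keys).length := List.filter_sublist.length_le
    _ ≤ (PySem.Dict.mk dic).keys.length := PySem.Set.length_ofList_le _
    _ = dic.length := by rw [PySem.Dict.keys_mk, List.length_map]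

-- ===== VERDICT (by name: the statement is the Claim_ definition above) =====
theorem dfs_spec : Claim_equal_dfs := by
  intro node depth n visited dic plist dep_a _hdom hpre
  obtain ⟨hnv, _hdep0, hrest⟩ := hpre
  unfold Spec_dfs dfs dfs_alt
  have hnv' : ¬ PySem.Set.contains visited node = true := by
    rw [PySem.Set.contains_iff]
    exact hnv
  have hfuel2 : dic.length + 2 = (dic.length + 1) + 1 := rfl
  rw [hfuel2]
  by_cases hlong : ((plist ++ [node]).length : Int) > PySem.Int.floordiv n 2
  · rw [dfsGoA.eq_2, if_neg hnv', if_pos hlong, if_neg hnv', if_pos hlong]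
  · have hclosed : ∀ p ∈ dic, ∀ c ∈ p.2, c ∈ dic.map Prod.fst := by
      rcases hrest with hl | ⟨_, hclosed, _⟩
      · exact absurd (by simpa using hl) hlong
      · exact hclosed
    have hdic : ∀ k c, c ∈ (PySem.Dict.mk dic).getD k [] → c ∈ (PySem.Dict.mk dic).keys := by
      intro k c hc
      obtain ⟨p, hp, hcp⟩ := pv_getD_sublist dic k c hc
      rw [PySem.Dict.keys_mk]
      exact hclosed p hp c hcp
    rw [dfsGoA.eq_2, if_neg hnv', if_neg hlong, if_neg hnv', if_neg hlong]
    have hfuel : dfsUncov (PySem.Dict.mk dic) (PySem.Set.add visited node) + 1 ≤ dic.length + 1 := by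
      have h1 := dfsUncov_add_le (PySem.Dict.mk dic) visited node
      have h2 := dfsUncov_le_len dic visited
      omega
    obtain ⟨r, v', p', a', hch, _hgrow, hm⟩ :=
      dfsMach_eq_dfsChA (PySem.Dict.mk dic) hdic (dic.length + 1)
        ((PySem.Dict.mk dic).getD node []) node depth n []
        (PySem.Set.add visited node) (plist ++ [node])
        (if depth > 0 then (PySem.Dict.mk dep_a).modify depth [] (fun l => l ++ [node]) else PySem.Dict.mk dep_a)
        (fun c hc => hdic node c hc) hfuel
    rw [hch, hm]
    by_cases hr : r = []
    · rw [if_pos hr, dfsMach.eq_1, hr]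
    · rw [if_neg hr]
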